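-- pv_equiv track=rewrite | github.com/svetlanasieber/Python---Problem-Solving | 03_phone_shop_function_ver.py | manage_phones
-- ===== SOURCE A (Python) =====
-- def manage_phones(existing_phones, commands):
--     phones = existing_phones.split(", ")
--
--     for command in commands:
--         if "Add" in command:
--             phone_to_add = command.split(" - ")[1]
--             if phone_to_add not in phones:
--                 phones.append(phone_to_add)
--         elif "Remove" in command:
--             phone_to_remove = command.split(" - ")[1]
--             if phone_to_remove in phones:
--                 phones.remove(phone_to_remove)
--         elif "Bonus phone" in command:
--             old_phone, new_phone = command.split(" - ")[1].split(":")
--             if old_phone in phones: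
--                 phones.insert(phones.index(old_phone) + 1, new_phone)
--         elif "Last" in command:
--             phone_to_move_last = command.split(" - ")[1]
--             if phone_to_move_last in phones:
--                 phones.remove(phone_to_move_last)
--                 phones.append(phone_to_move_last)
--         elif "End" in command:
--             return ", ".join(phones)
-- ===== SOURCE B (Python) =====
-- # B: classify-then-apply decomposition; each list edit is a single pure one-pass
-- # rebuild (flag-carrying scan) instead of A's membership test + in-place mutation
-- # (which rescans the list up to three times per command).
--
-- def _kind(c):
--     if "Add" in c:
--         return 1
--     if "Remove" in c:
--         return 2
--     if "Bonus phone" in c: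
--         return 3
--     if "Last" in c:
--         return 4
--     if "End" in c:
--         return 5
--     return 0
--
-- def _remove_first(ph, x):
--     out = []
--     removed = False
--     for v in ph:
--         if removed or v != x:
--             out.append(v)
--         else:
--             removed = True
--     return out
--
-- def _insert_after_first(ph, old, new):
--     out = []
--     inserted = False
--     for v in ph:
--         out.append(v)
--         if not inserted and v == old:
--             out.append(new)
--             inserted = True
--     return out
--
-- def _move_last(ph, x):
--     out = []
--     removed = False
--     for v in ph:
--         if removed or v != x:
--             out.append(v)
--         else:
--             removed = True
--     return out + [x] if removed else out
--
-- def _apply(kind, ph, c):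
--     if kind == 0:
--         return ph
--     arg = c.split(" - ")[1]
--     if kind == 1:
--         return ph if arg in ph else ph + [arg]
--     if kind == 2:
--         return _remove_first(ph, arg)
--     if kind == 3:
--         old, new = arg.split(":")
--         return _insert_after_first(ph, old, new)
--     return _move_last(ph, arg)
--
-- def manage_phones(existing_phones, commands):
--     phones = existing_phones.split(", ")
--     for c in commands:
--         k = _kind(c)
--         if k == 5:
--             return ", ".join(phones)
--         phones = _apply(k, phones, c)
--     return None
-- ===== Notes on version B (the rewrite author's own statement) =====
-- stated objective: alternative
-- what changed: B splits the loop into a classify step (command kind) plus an apply step, and replaces A's membership-test-then-in-place-mutation (up to three scans of the phone list per command: in / remove / index+insert) by pure single-pass flag-carrying scans that rebuild the list once.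
import Mathlib
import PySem

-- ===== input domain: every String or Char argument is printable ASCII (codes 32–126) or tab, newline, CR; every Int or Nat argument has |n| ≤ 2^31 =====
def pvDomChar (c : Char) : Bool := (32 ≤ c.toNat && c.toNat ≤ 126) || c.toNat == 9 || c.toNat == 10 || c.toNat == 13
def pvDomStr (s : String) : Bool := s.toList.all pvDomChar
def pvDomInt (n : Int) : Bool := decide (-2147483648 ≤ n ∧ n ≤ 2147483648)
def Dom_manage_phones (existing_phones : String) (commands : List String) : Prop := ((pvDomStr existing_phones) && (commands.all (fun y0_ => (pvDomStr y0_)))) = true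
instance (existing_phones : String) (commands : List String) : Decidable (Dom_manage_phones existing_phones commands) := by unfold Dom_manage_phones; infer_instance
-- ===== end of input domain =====

-- B replaces A's membership-test-plus-in-place-mutation per command (up to three scans of the
-- phone list per command) by a classify-then-apply decomposition whose list edits are single
-- pure flag-carrying scans; same return value on every non-raising input (Pre_).

-- ===== PORT A =====
-- s.split(sep) for a nonempty literal sep: split? is some there, so getD [] is exact.
def pySplit (s sep : String) : List String :=
  (PySem.Str.split? s sep).getD []

-- A's for-loop over commands with its early return; `none` on the right of a failed
-- pyGet?/list-unpack marks the raising paths, which Pre_ excludes.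
def manageA : List String → List String → Option String
  | _, [] => none
  | phones, command :: rest =>
    if PySem.Str.isIn "Add" command then
      match PySem.List.pyGet? (pySplit command " - ") 1 with
      | none => none
      | some phone_to_add =>
        manageA (if phone_to_add ∈ phones then phones else phones ++ [phone_to_add]) rest
    else if PySem.Str.isIn "Remove" command then
      match PySem.List.pyGet? (pySplit command " - ") 1 with
      | none => none
      | some phone_to_remove =>
        if phone_to_remove ∈ phones then
          match PySem.List.remove? phones phone_to_remove with
          | none => none
          | some phones' => manageA phones' rest
        else manageA phones rest
    else if PySem.Str.isIn "Bonus phone" command then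
      match PySem.List.pyGet? (pySplit command " - ") 1 with
      | none => none
      | some arg =>
        match pySplit arg ":" with
        | [old_phone, new_phone] =>
          if old_phone ∈ phones then
            match PySem.List.index? phones old_phone with
            | none => none
            | some i => manageA (PySem.List.insert phones ((i : Int) + 1) new_phone) rest
          else manageA phones rest
        | _ => none
    else if PySem.Str.isIn "Last" command then
      match PySem.List.pyGet? (pySplit command " - ") 1 with
      | none => none
      | some phone_to_move_last =>
        if phone_to_move_last ∈ phones then
          match PySem.List.remove? phones phone_to_move_last with
          | none => none
          | some phones' => manageA (phones' ++ [phone_to_move_last]) rest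
        else manageA phones rest
    else if PySem.Str.isIn "End" command then
      some (PySem.Str.join ", " phones)
    else manageA phones rest

def manage_phones (existing_phones : String) (commands : List String) : Option String :=
  manageA (pySplit existing_phones ", ") commands

-- ===== PORT B =====
def kindB (c : String) : Int :=
  if PySem.Str.isIn "Add" c then 1
  else if PySem.Str.isIn "Remove" c then 2
  else if PySem.Str.isIn "Bonus phone" c then 3
  else if PySem.Str.isIn "Last" c then 4
  else if PySem.Str.isIn "End" c then 5
  else 0

def removeFirstB (ph : List String) (x : String) : List String :=
  (ph.foldl (fun s v => if s.2 || v ≠ x then (s.1 ++ [v], s.2) else (s.1, true))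
    (([] : List String), false)).1

def insertAfterFirstB (ph : List String) (old new : String) : List String :=
  (ph.foldl (fun s v => if !s.2 && v = old then (s.1 ++ [v, new], true) else (s.1 ++ [v], s.2))
    (([] : List String), false)).1

def moveLastB (ph : List String) (x : String) : List String :=
  let r := ph.foldl (fun s v => if s.2 || v ≠ x then (s.1 ++ [v], s.2) else (s.1, true))
    (([] : List String), false)
  if r.2 then r.1 ++ [x] else r.1

def applyB (k : Int) (ph : List String) (c : String) : Option (List String) :=
  if k = 0 then some ph else
  match PySem.List.pyGet? (pySplit c " - ") 1 with
  | none => none        -- IndexError; outside Pre_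
  | some arg =>
    if k = 1 then some (if arg ∈ ph then ph else ph ++ [arg])
    else if k = 2 then some (removeFirstB ph arg)
    else if k = 3 then
      match pySplit arg ":" with
      | [old, nw] => some (insertAfterFirstB ph old nw)
      | _ => none       -- ValueError on unpacking; outside Pre_
    else some (moveLastB ph arg)

def manageB : List String → List String → Option String
  | _, [] => none
  | phones, c :: rest =>
    let k := kindB c
    if k = 5 then some (PySem.Str.join ", " phones)
    else
      match applyB k phones c with
      | none => none
      | some phones' => manageB phones' rest

def manage_phones_alt (existing_phones : String) (commands : List String) : Option String :=
  manageB (pySplit existing_phones ", ") commands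

-- ===== PRECONDITION & SPEC =====
-- a command on which the dispatch reaches the `End` branch (ends the loop)
def isEndCmd (c : String) : Bool :=
  PySem.Str.isIn "End" c && !PySem.Str.isIn "Add" c && !PySem.Str.isIn "Remove" c
    && !PySem.Str.isIn "Bonus phone" c && !PySem.Str.isIn "Last" c

-- a command A processes without raising: its branch finds the " - " payload
-- (and, for Bonus phone, the payload splits on ":" into exactly two parts)
def wfCmd (c : String) : Bool :=
  if PySem.Str.isIn "Add" c then 2 ≤ (pySplit c " - ").length
  else if PySem.Str.isIn "Remove" c then 2 ≤ (pySplit c " - ").length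
  else if PySem.Str.isIn "Bonus phone" c then
    match (pySplit c " - ")[1]? with
    | some arg => (pySplit arg ":").length == 2
    | none => false
  else if PySem.Str.isIn "Last" c then 2 ≤ (pySplit c " - ").length
  else true

-- Pre_ excludes exactly the inputs on which A raises (IndexError on a reachable command with no
-- " - " payload, or ValueError unpacking the ":" split of a "Bonus phone" payload): every command
-- the loop reaches before its first End-dispatched command must be well-formed.
def Pre_manage_phones (existing_phones : String) (commands : List String) : Prop :=
  ∀ c ∈ commands.takeWhile (fun c => !isEndCmd c), wfCmd c = true

instance (existing_phones : String) (commands : List String) : Decidable (Pre_manage_phones existing_phones commands) := by unfold Pre_manage_phones; infer_instance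

def pvWitness_manage_phones : String × List String :=
  ("Nokia, iPhone", ["Add - Samsung", "Remove - Nokia", "Bonus phone - iPhone:Pixel", "End"])

def Spec_manage_phones (existing_phones : String) (commands : List String) (out : Option String) : Prop := out = manage_phones_alt existing_phones commands
instance (existing_phones : String) (commands : List String) (out : Option String) : Decidable (Spec_manage_phones existing_phones commands out) := by unfold Spec_manage_phones; infer_instance

-- ===== CLAIM (what is proved, stated in full; the proofs are below) =====
def Claim_equal_manage_phones : Prop := ∀ (existing_phones : String) (commands : List String), Dom_manage_phones existing_phones commands → Pre_manage_phones existing_phones commands → Spec_manage_phones existing_phones commands (manage_phones existing_phones commands)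

-- ===== LEMMAS AND PROOFS =====

-- the one-pass remove/move scan with the flag already set copies the rest unchanged
theorem rmScan_true (x : String) (ph : List String) (acc : List String) :
    ph.foldl (fun s v => if s.2 || v ≠ x then (s.1 ++ [v], s.2) else (s.1, true)) (acc, true)
      = (acc ++ ph, true) := by
  induction ph generalizing acc with
  | nil => simp
  | cons v vs ih =>
    rw [List.foldl_cons]
    show List.foldl _ (if ((true : Bool) || v ≠ x) = true then (acc ++ [v], true) else (acc, true)) vs = _
    rw [if_pos (by simp), ih]
    simp

-- the scan from a clear flag erases the first occurrence; the flag records membership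
theorem rmScan_false (x : String) (ph : List String) (acc : List String) :
    ph.foldl (fun s v => if s.2 || v ≠ x then (s.1 ++ [v], s.2) else (s.1, true)) (acc, false)
      = if x ∈ ph then (acc ++ ph.erase x, true) else (acc ++ ph, false) := by
  induction ph generalizing acc with
  | nil => simp
  | cons v vs ih =>
    rw [List.foldl_cons]
    show List.foldl _ (if ((false : Bool) || v ≠ x) = true then (acc ++ [v], false) else (acc, true)) vs = _
    by_cases hvx : v = x
    · rw [if_neg (by simp [hvx]), rmScan_true]
      rw [if_pos (by simp [hvx])]
      simp [hvx]
    · rw [if_pos (by simp [hvx]), ih]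
      by_cases hm : x ∈ vs
      · rw [if_pos hm, if_pos (by simp [hm])]
        simp [hvx]
      · rw [if_neg hm, if_neg (by
          intro hmem
          rcases List.mem_cons.mp hmem with h | h
          · exact hvx h.symm
          · exact hm h)]
        simp

theorem removeFirstB_mem {x : String} {ph : List String} (h : x ∈ ph) :
    removeFirstB ph x = ph.erase x := by
  unfold removeFirstB; rw [rmScan_false, if_pos h]; simp

theorem removeFirstB_not_mem {x : String} {ph : List String} (h : x ∉ ph) :
    removeFirstB ph x = ph := by
  unfold removeFirstB; rw [rmScan_false, if_neg h]; simp

theorem moveLastB_mem {x : String} {ph : List String} (h : x ∈ ph) :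
    moveLastB ph x = ph.erase x ++ [x] := by
  unfold moveLastB; rw [rmScan_false, if_pos h]; simp

theorem moveLastB_not_mem {x : String} {ph : List String} (h : x ∉ ph) :
    moveLastB ph x = ph := by
  unfold moveLastB; rw [rmScan_false, if_neg h]; simp

-- the one-pass insert scan with the flag already set copies the rest unchanged
theorem insScan_true (old nw : String) (ph : List String) (acc : List String) :
    ph.foldl (fun s v => if !s.2 && v = old then (s.1 ++ [v, nw], true) else (s.1 ++ [v], s.2)) (acc, true)
      = (acc ++ ph, true) := by
  induction ph generalizing acc with
  | nil => simp
  | cons v vs ih =>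
    rw [List.foldl_cons]
    show List.foldl _ (if (!(true : Bool) && v = old) = true then (acc ++ [v, nw], true) else (acc ++ [v], true)) vs = _
    rw [if_neg (by simp), ih]
    simp

-- recursive description of "insert nw after the first occurrence of old"
def insAf (old nw : String) : List String → List String
  | [] => []
  | v :: vs => if v = old then v :: nw :: vs else v :: insAf old nw vs

theorem insScan_false (old nw : String) (ph : List String) (acc : List String) :
    ph.foldl (fun s v => if !s.2 && v = old then (s.1 ++ [v, nw], true) else (s.1 ++ [v], s.2)) (acc, false)
      = (acc ++ insAf old nw ph, decide (old ∈ ph)) := by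
  induction ph generalizing acc with
  | nil => simp [insAf]
  | cons v vs ih =>
    rw [List.foldl_cons]
    show List.foldl _ (if (!(false : Bool) && v = old) = true then (acc ++ [v, nw], true) else (acc ++ [v], false)) vs = _
    by_cases hv : v = old
    · rw [if_pos (by simp [hv]), insScan_true]
      simp [insAf, hv]
    · rw [if_neg (by simp [hv]), ih]
      have : ¬ old = v := fun h => hv h.symm
      simp [insAf, hv, this]

theorem insertAfterFirstB_eq (old nw : String) (ph : List String) :
    insertAfterFirstB ph old nw = insAf old nw ph := by
  unfold insertAfterFirstB; rw [insScan_false]; simp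

theorem insAf_not_mem {old : String} (nw : String) {ph : List String} (h : old ∉ ph) :
    insAf old nw ph = ph := by
  induction ph with
  | nil => rfl
  | cons v vs ih =>
    simp only [List.mem_cons, not_or] at h
    have hvo : ¬ v = old := fun hh => h.1 hh.symm
    simp [insAf, hvo, ih h.2]

-- A's index-then-insert equals the one-pass insAf on members
theorem index_insert_eq_insAf {old : String} (nw : String) {ph : List String} {i : ℕ}
    (hidx : PySem.List.index? ph old = some i) :
    PySem.List.insert ph ((i : Int) + 1) nw = insAf old nw ph := by
  induction ph generalizing i with
  | nil => simp [PySem.List.index?_eq_idxOf?] at hidx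
  | cons v vs ih =>
    by_cases hv : v = old
    · subst hv
      rw [PySem.List.index?_cons_self] at hidx
      obtain rfl : i = 0 := by simpa using hidx.symm
      have h1 : PySem.List.insert (v :: vs) ((1 : ℕ) : Int) nw
          = List.take 1 (v :: vs) ++ nw :: List.drop 1 (v :: vs) :=
        PySem.List.insert_natCast _ 1 _ (by simp)
      simpa [insAf] using h1
    · rw [PySem.List.index?_cons_of_ne _ hv] at hidx
      match hvs : PySem.List.index? vs old with
      | none => rw [hvs] at hidx; simp at hidx
      | some j =>
        rw [hvs] at hidx
        simp only [Option.map_some, Option.some.injEq] at hidx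
        subst hidx
        have hj : j < vs.length := by
          rw [PySem.List.index?_eq_idxOf?] at hvs
          have := List.idxOf?_eq_some_iff.mp hvs
          exact this.choose
        have h1 : PySem.List.insert (v :: vs) (((j + 2 : ℕ) : Int)) nw
            = List.take (j + 2) (v :: vs) ++ nw :: List.drop (j + 2) (v :: vs) :=
          PySem.List.insert_natCast _ _ _ (by simp; omega)
        have h2 : PySem.List.insert vs (((j + 1 : ℕ) : Int)) nw
            = List.take (j + 1) vs ++ nw :: List.drop (j + 1) vs :=
          PySem.List.insert_natCast _ _ _ (by omega)
        calc PySem.List.insert (v :: vs) (((j + 1 : ℕ) : Int) + 1) nw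
            = PySem.List.insert (v :: vs) ((j + 2 : ℕ) : Int) nw := by
              rw [show (((j + 1 : ℕ) : Int) + 1) = ((j + 2 : ℕ) : Int) by push_cast; ring]
          _ = List.take (j + 2) (v :: vs) ++ nw :: List.drop (j + 2) (v :: vs) := h1
          _ = v :: (List.take (j + 1) vs ++ nw :: List.drop (j + 1) vs) := by simp
          _ = v :: PySem.List.insert vs ((j + 1 : ℕ) : Int) nw := by rw [h2]
          _ = v :: insAf old nw vs := by
              rw [show ((j + 1 : ℕ) : Int) = ((j : Int) + 1) by push_cast; ring, ih hvs]
          _ = insAf old nw (v :: vs) := by simp [insAf, hv]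

-- pyGet? at the non-negative literal index 1 is plain list indexing
theorem pyGet?_one (l : List String) : PySem.List.pyGet? l 1 = l[1]? := by
  rw [show (1 : Int) = ((1 : ℕ) : Int) by simp, PySem.List.pyGet?_natCast]

-- main loop equivalence, by induction over the command list
theorem manage_loop_eq (cmds : List String) (phones : List String)
    (hpre : ∀ c ∈ cmds.takeWhile (fun c => !isEndCmd c), wfCmd c = true) :
    manageA phones cmds = manageB phones cmds := by
  induction cmds generalizing phones with
  | nil => rfl
  | cons c rest ih =>
    by_cases hA : PySem.Str.isIn "Add" c = true
    · -- Add branch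
      have hend : isEndCmd c = false := by
        simp only [isEndCmd, hA, Bool.not_true, Bool.and_false, Bool.false_and]
      have hc := hpre c (by rw [List.takeWhile_cons, hend]; simp)
      have hrest : ∀ x ∈ rest.takeWhile (fun c => !isEndCmd c), wfCmd x = true :=
        fun x hx => hpre x (by rw [List.takeWhile_cons, hend]; simp [hx])
      unfold wfCmd at hc
      rw [if_pos hA] at hc
      have hlen : 2 ≤ (pySplit c " - ").length := of_decide_eq_true hc
      obtain ⟨y, hy⟩ : ∃ y, (pySplit c " - ")[1]? = some y :=
        ⟨_, List.getElem?_eq_getElem (by omega)⟩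
      have hy' : PySem.List.pyGet? (pySplit c " - ") 1 = some y := by rw [pyGet?_one, hy]
      simp only [manageA, manageB, kindB, applyB, hA, if_true, hy']
      norm_num
      exact ih _ hrest
    · by_cases hR : PySem.Str.isIn "Remove" c = true
      · -- Remove branch
        have hend : isEndCmd c = false := by
          simp only [isEndCmd, hR, Bool.not_true, Bool.and_false, Bool.false_and]
        have hc := hpre c (by rw [List.takeWhile_cons, hend]; simp)
        have hrest : ∀ x ∈ rest.takeWhile (fun c => !isEndCmd c), wfCmd x = true :=
          fun x hx => hpre x (by rw [List.takeWhile_cons, hend]; simp [hx])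
        unfold wfCmd at hc
        rw [if_neg hA, if_pos hR] at hc
        have hlen : 2 ≤ (pySplit c " - ").length := of_decide_eq_true hc
        obtain ⟨y, hy⟩ : ∃ y, (pySplit c " - ")[1]? = some y :=
          ⟨_, List.getElem?_eq_getElem (by omega)⟩
        have hy' : PySem.List.pyGet? (pySplit c " - ") 1 = some y := by rw [pyGet?_one, hy]
        by_cases hm : y ∈ phones
        · have hrem := PySem.List.remove?_eq_some_erase phones y hm
          simp only [manageA, manageB, kindB, applyB, hA, hR, if_true, if_false,
            Bool.false_eq_true, hy', hrem, hm, removeFirstB_mem hm]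
          norm_num
          exact ih _ hrest
        · simp only [manageA, manageB, kindB, applyB, hA, hR, if_true, if_false,
            Bool.false_eq_true, hy', hm, removeFirstB_not_mem hm]
          norm_num
          exact ih _ hrest
      · by_cases hB : PySem.Str.isIn "Bonus phone" c = true
        · -- Bonus phone branch
          have hend : isEndCmd c = false := by
            simp only [isEndCmd, hB, Bool.not_true, Bool.and_false, Bool.false_and]
          have hc := hpre c (by rw [List.takeWhile_cons, hend]; simp)
          have hrest : ∀ x ∈ rest.takeWhile (fun c => !isEndCmd c), wfCmd x = true :=
            fun x hx => hpre x (by rw [List.takeWhile_cons, hend]; simp [hx])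
          unfold wfCmd at hc
          rw [if_neg hA, if_neg hR, if_pos hB] at hc
          obtain ⟨y, hy⟩ : ∃ y, (pySplit c " - ")[1]? = some y := by
            match hl : (pySplit c " - ")[1]? with
            | some y => exact ⟨y, rfl⟩
            | none => rw [hl] at hc; simp at hc
          rw [hy] at hc
          have hlen2 : (pySplit y ":").length = 2 := by simpa using hc
          obtain ⟨po, pn, hsplit⟩ : ∃ a b, pySplit y ":" = [a, b] := by
            match hs : pySplit y ":" with
            | [a, b] => exact ⟨a, b, rfl⟩
            | [] | [a] | a :: b :: x :: t => rw [hs] at hlen2; simp at hlen2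
          have hy' : PySem.List.pyGet? (pySplit c " - ") 1 = some y := by rw [pyGet?_one, hy]
          by_cases hm : po ∈ phones
          · obtain ⟨i, hi⟩ : ∃ i, PySem.List.index? phones po = some i := by
              have := (PySem.List.index?_isSome_iff phones po).mpr hm
              exact Option.isSome_iff_exists.mp this
            simp only [manageA, manageB, kindB, applyB, hA, hR, hB, if_true, if_false,
              Bool.false_eq_true, hy', hsplit, hm, hi, index_insert_eq_insAf pn hi,
              insertAfterFirstB_eq]
            norm_num
            exact ih _ hrest
          · simp only [manageA, manageB, kindB, applyB, hA, hR, hB, if_true, if_false,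
              Bool.false_eq_true, hy', hsplit, hm, insertAfterFirstB_eq,
              insAf_not_mem pn hm]
            norm_num
            exact ih _ hrest
        · by_cases hL : PySem.Str.isIn "Last" c = true
          · -- Last branch
            have hend : isEndCmd c = false := by
              simp only [isEndCmd, hL, Bool.not_true, Bool.and_false]
            have hc := hpre c (by rw [List.takeWhile_cons, hend]; simp)
            have hrest : ∀ x ∈ rest.takeWhile (fun c => !isEndCmd c), wfCmd x = true :=
              fun x hx => hpre x (by rw [List.takeWhile_cons, hend]; simp [hx])
            unfold wfCmd at hc
            rw [if_neg hA, if_neg hR, if_neg hB,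
              if_pos hL] at hc
            have hlen : 2 ≤ (pySplit c " - ").length := of_decide_eq_true hc
            obtain ⟨y, hy⟩ : ∃ y, (pySplit c " - ")[1]? = some y :=
              ⟨_, List.getElem?_eq_getElem (by omega)⟩
            have hy' : PySem.List.pyGet? (pySplit c " - ") 1 = some y := by rw [pyGet?_one, hy]
            by_cases hm : y ∈ phones
            · have hrem := PySem.List.remove?_eq_some_erase phones y hm
              simp only [manageA, manageB, kindB, applyB, hA, hR, hB, hL, if_true, if_false,
                Bool.false_eq_true, hy', hrem, hm, moveLastB_mem hm]
              norm_num
              exact ih _ hrest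
            · simp only [manageA, manageB, kindB, applyB, hA, hR, hB, hL, if_true, if_false,
                Bool.false_eq_true, hy', hm, moveLastB_not_mem hm]
              norm_num
              exact ih _ hrest
          · by_cases hE : PySem.Str.isIn "End" c = true
            · -- End branch: both return the joined list
              simp only [manageA, manageB, kindB, hA, hR, hB, hL, hE, if_true, if_false,
                Bool.false_eq_true]
            · -- no-op command
              have hend : isEndCmd c = false := by
                simp only [isEndCmd, Bool.eq_false_iff.mpr hE, Bool.false_and]
              have hrest : ∀ x ∈ rest.takeWhile (fun c => !isEndCmd c), wfCmd x = true :=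
                fun x hx => hpre x (by rw [List.takeWhile_cons, hend]; simp [hx])
              simp only [manageA, manageB, kindB, applyB, hA, hR, hB, hL, hE, if_true,
                if_false, Bool.false_eq_true]
              norm_num
              exact ih _ hrest

-- ===== VERDICT (by name: the statement is the Claim_ definition above) =====
theorem manage_phones_spec : Claim_equal_manage_phones := by
  intro ep cmds _hdom hpre
  unfold Spec_manage_phones manage_phones manage_phones_alt
  exact manage_loop_eq cmds _ hpre
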